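-- pv_equiv track=rewrite | github.com/miliar/Code_Jam_Webscraper | solutions_python/Problem_155/2660.py | resolve_case
-- ===== SOURCE A (Python) =====
-- def resolve_case(Smax,A):
-- 	[friends, standing, k] = [0, 0, 0]
-- 	while (standing < Smax):
-- 		if k > standing:
-- 			friends += (k - standing)
-- 			standing = friends + sum(A[:k+1])
-- 			k=standing
-- 		else:
-- 			standing = friends + sum(A[:k+1])
-- 			k += 1
-- 	return friends
-- ===== SOURCE B (Python) =====
-- def resolve_case(Smax, A):
--     # Same greedy process, but sum(A[:j]) is answered from a prefix-sum
--     # table built once instead of re-scanning a slice each iteration.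
--     n = len(A)
--     P = [0]
--     for a in A:
--         P.append(P[-1] + a)
--
--     def psum(j):  # == sum(A[:j]) for any int j (Python slice clamping)
--         if j < 0:
--             j += n
--         if j < 0:
--             j = 0
--         if j > n:
--             j = n
--         return P[j]
--
--     friends = 0
--     standing = 0
--     k = 0
--     while standing < Smax:
--         if k > standing:
--             friends += (k - standing)
--             standing = friends + psum(k + 1)
--             k = standing
--         else:
--             standing = friends + psum(k + 1)
--             k += 1
--     return friends
-- ===== Notes on version B (the rewrite author's own statement) =====
-- stated objective: alternative
-- what changed: B precomputes the prefix-sum table of A once and answers every sum(A[:k+1]) inside the greedy loop by a clamped table lookup instead of re-scanning a slice; same results, the inner scan is replaced by the table.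
import Mathlib
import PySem

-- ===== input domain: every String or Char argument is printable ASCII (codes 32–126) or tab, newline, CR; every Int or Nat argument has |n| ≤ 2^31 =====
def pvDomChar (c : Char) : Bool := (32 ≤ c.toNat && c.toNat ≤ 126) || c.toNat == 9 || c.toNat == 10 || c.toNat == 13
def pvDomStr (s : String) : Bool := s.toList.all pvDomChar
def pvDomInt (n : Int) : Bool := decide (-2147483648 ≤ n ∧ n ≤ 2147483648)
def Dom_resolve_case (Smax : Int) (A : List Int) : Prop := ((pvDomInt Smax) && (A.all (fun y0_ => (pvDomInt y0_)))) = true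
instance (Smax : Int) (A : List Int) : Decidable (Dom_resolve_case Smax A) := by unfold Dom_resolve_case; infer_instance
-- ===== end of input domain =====

-- B answers A's per-iteration sum(A[:k+1]) from a prefix-sum table built once
-- instead of re-scanning a slice (objective: alternative structure, same results).
-- Both ports carry an (amply large) fuel counter solely as a totality guard
-- for the while loop; at exhaustion both return the current `friends`.

-- ===== PORT A =====
-- sum(A[:j])
def pvSumSlice (A : List Int) (j : Int) : Int :=
  (PySem.List.slice A none (some j)).sum

-- the while loop of A: state (friends, standing, k)
def pvLoopA (Smax : Int) (A : List Int) : Nat → Int → Int → Int → Int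
  | 0, friends, _, _ => friends
  | fuel + 1, friends, standing, k =>
    if standing < Smax then
      if k > standing then
        let friends' := friends + (k - standing)
        let standing' := friends' + pvSumSlice A (k + 1)
        pvLoopA Smax A fuel friends' standing' standing'
      else
        let standing' := friends + pvSumSlice A (k + 1)
        pvLoopA Smax A fuel friends standing' (k + 1)
    else friends

def resolve_case (Smax : Int) (A : List Int) : Int :=
  pvLoopA Smax A 18446744073709551616 0 0 0

-- ===== PORT B =====
-- P = [0]; for a in A: P.append(P[-1] + a)   (prefix sums, head-first recursion)
def pvPrefixTable (t : Int) : List Int → List Int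
  | [] => [t]
  | a :: rest => t :: pvPrefixTable (t + a) rest

-- psum(j) of Source B: clamp j exactly as a Python slice bound, then index P
-- (the index is within P by construction, so getD's default is never used)
def pvPsum (P : List Int) (n : Int) (j : Int) : Int :=
  let j1 := if j < 0 then j + n else j
  let j2 := if j1 < 0 then 0 else j1
  let j3 := if j2 > n then n else j2
  P.getD j3.toNat 0

-- the while loop of Source B, consulting the table
def pvLoopB (Smax n : Int) (P : List Int) : Nat → Int → Int → Int → Int
  | 0, friends, _, _ => friends
  | fuel + 1, friends, standing, k =>
    if standing < Smax then
      if k > standing then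
        let friends' := friends + (k - standing)
        let standing' := friends' + pvPsum P n (k + 1)
        pvLoopB Smax n P fuel friends' standing' standing'
      else
        let standing' := friends + pvPsum P n (k + 1)
        pvLoopB Smax n P fuel friends standing' (k + 1)
    else friends

def resolve_case_alt (Smax : Int) (A : List Int) : Int :=
  pvLoopB Smax (A.length : Int) (pvPrefixTable 0 A) 18446744073709551616 0 0 0

-- ===== PRECONDITION & SPEC =====
def Spec_resolve_case (Smax : Int) (A : List Int) (out : Int) : Prop := out = resolve_case_alt Smax A
instance (Smax : Int) (A : List Int) (out : Int) : Decidable (Spec_resolve_case Smax A out) := by unfold Spec_resolve_case; infer_instance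

-- ===== CLAIM (what is proved, stated in full; the proofs are below) =====
def Claim_equal_resolve_case : Prop := ∀ (Smax : Int) (A : List Int), Dom_resolve_case Smax A → Spec_resolve_case Smax A (resolve_case Smax A)

-- ===== LEMMAS AND PROOFS =====

-- entry m of the prefix table started at t is t plus the sum of the first m elements
theorem pvPrefixTable_getD (A : List Int) : ∀ (t : Int) (m : Nat), m ≤ A.length →
    (pvPrefixTable t A).getD m 0 = t + (A.take m).sum := by
  induction A with
  | nil =>
    intro t m hm
    have h0 : m = 0 := by simpa using hm
    subst h0; simp [pvPrefixTable]
  | cons a rest ih =>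
    intro t m hm
    cases m with
    | zero => simp [pvPrefixTable]
    | succ m =>
      simp only [pvPrefixTable, List.getD, List.getElem?_cons_succ, List.take_succ_cons,
        List.sum_cons]
      have := ih (t + a) m (by simpa using hm)
      simp only [List.getD] at this
      rw [this]; ring

-- the clamped table lookup answers exactly sum(A[:j])
theorem pvPsum_eq (A : List Int) (j : Int) :
    pvPsum (pvPrefixTable 0 A) (A.length : Int) j = pvSumSlice A j := by
  simp only [pvPsum, pvSumSlice]
  by_cases hj : j < 0
  · -- negative upper bound: j = -(k : Nat), slice takes length - k
    obtain ⟨k, hk, rfl⟩ : ∃ k : Nat, 0 < k ∧ j = -(k : Int) := by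
      refine ⟨(-j).toNat, by omega, by omega⟩
    rw [PySem.List.slice_to_neg_natCast A k hk]
    by_cases h2 : -(k : Int) + A.length < 0
    · have hk' : A.length ≤ k := by omega
      simp only [if_pos hj, if_pos h2]
      have : A.length - k = 0 := by omega
      rw [this]
      have h3 : ¬ ((0 : Int) > (A.length : Int)) := by omega
      rw [if_neg h3]
      simpa using pvPrefixTable_getD A 0 0 (by omega)
    · have hkn : k ≤ A.length := by omega
      simp only [if_pos hj, if_neg h2]
      have h3 : ¬ (-(k : Int) + A.length > (A.length : Int)) := by omega
      rw [if_neg h3]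
      have h4 : (-(k : Int) + A.length).toNat = A.length - k := by omega
      rw [h4]
      simpa using pvPrefixTable_getD A 0 (A.length - k) (by omega)
  · -- nonnegative upper bound: slice takes j.toNat, table clamps to length
    rw [PySem.List.slice_to A (show (0:Int) ≤ j by omega), if_neg hj]
    by_cases h2 : j < 0
    · omega
    · rw [if_neg h2]
      by_cases h3 : j > (A.length : Int)
      · rw [if_pos h3]
        have : A.take j.toNat = A := List.take_of_length_le (by omega)
        rw [this]
        simpa using pvPrefixTable_getD A 0 A.length (le_refl _)
      · rw [if_neg h3]
        simpa using pvPrefixTable_getD A 0 j.toNat (by omega)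

-- the two loops agree step for step, for every fuel and state
theorem pvLoop_eq (Smax : Int) (A : List Int) : ∀ (fuel : Nat) (f s k : Int),
    pvLoopA Smax A fuel f s k
      = pvLoopB Smax (A.length : Int) (pvPrefixTable 0 A) fuel f s k := by
  intro fuel
  induction fuel with
  | zero => intro f s k; rfl
  | succ fuel ih =>
    intro f s k
    simp only [pvLoopA, pvLoopB, pvPsum_eq, ih]

-- ===== VERDICT (by name: the statement is the Claim_ definition above) =====
theorem resolve_case_spec : Claim_equal_resolve_case := by
  intro Smax A _
  unfold Spec_resolve_case resolve_case resolve_case_alt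
  exact pvLoop_eq Smax A _ 0 0 0
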